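-- pv_equiv track=rewrite | github.com/pc5401/my_BOJ | 백준/Silver/3060. 욕심쟁이 돼지/욕심쟁이 돼지.py | solve
-- ===== SOURCE A (Python) =====
-- def solve(N: int, eated: list[int]) -> int:
--     day = 1
--     wanted = eated[:]
--     M = 6
--     while sum(wanted) <= N:
--         day += 1
--         eated = wanted[:]
--
--         for i in range(M):
--             wanted[i] += eated[(i+1) % M]
--             wanted[i] += eated[(M+i-1) % M]
--             wanted[i] += eated[(i+3) % M]
--
--     return day
-- ===== SOURCE B (Python) =====
-- def solve(N: int, eated: list[int]) -> int:
--     # Each feeding round replaces every pig's demand by itself plus three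
--     # snapshot demands, and over the six pigs each snapshot entry is added
--     # exactly three times, so the total demand is multiplied by 4 per day.
--     day = 1
--     s = sum(eated)
--     while s <= N:
--         day += 1
--         s *= 4
--     return day
-- ===== Notes on version B (the rewrite author's own statement) =====
-- stated objective: simpler
-- what changed: Replaces the per-pig list simulation (copying the list and doing six mod-6 neighbour updates each day) with a single scalar recurrence: the total demand is multiplied by exactly 4 each day, so B just multiplies one running sum.
-- outside the precondition, e.g. on solve(20, [1, 0, 0, 0, 0, 0, 3]): A returns 4, B returns 3; on solve(5, [1]): A raises IndexError, B returns 3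
import Mathlib
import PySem

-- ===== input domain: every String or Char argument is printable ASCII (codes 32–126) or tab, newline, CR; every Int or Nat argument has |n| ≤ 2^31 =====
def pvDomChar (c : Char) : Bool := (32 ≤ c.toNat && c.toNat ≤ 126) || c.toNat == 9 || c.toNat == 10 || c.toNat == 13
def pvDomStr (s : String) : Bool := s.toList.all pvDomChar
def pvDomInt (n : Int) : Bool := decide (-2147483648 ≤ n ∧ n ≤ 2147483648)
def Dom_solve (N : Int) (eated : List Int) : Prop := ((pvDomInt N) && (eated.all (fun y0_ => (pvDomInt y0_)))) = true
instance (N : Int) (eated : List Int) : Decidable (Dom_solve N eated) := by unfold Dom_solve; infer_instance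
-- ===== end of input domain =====

-- B replaces the per-pig list simulation by one scalar recurrence (total demand ×4 per day); simpler, same while-loop cost per day.

-- ===== PORT A =====
-- one pass of A's inner `for i in range(6)` loop: reads the snapshot `e`, updates `wanted` in place
def stepA (e : List Int) : List Int :=
  (List.range 6).foldl (fun wanted i =>
    let wanted := wanted.set i (wanted.getD i 0 + e.getD ((i+1) % 6) 0)
    let wanted := wanted.set i (wanted.getD i 0 + e.getD ((6+i-1) % 6) 0)
    wanted.set i (wanted.getD i 0 + e.getD ((i+3) % 6) 0)) e

-- A's while loop; `fuel` only makes the recursion total (64 iterations always suffice on Pre_solve)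
def loopA (N : Int) (wanted : List Int) (day : Int) : Nat → Int
  | 0 => day
  | fuel+1 => if wanted.sum ≤ N then loopA N (stepA wanted) (day+1) fuel else day

def solve (N : Int) (eated : List Int) : Int :=
  loopA N eated 1 64

-- ===== PORT B =====
-- B's while loop on the running total; same fuel guard for totality
def loopB (N s day : Int) : Nat → Int
  | 0 => day
  | fuel+1 => if s ≤ N then loopB N (s*4) (day+1) fuel else day

def solve_alt (N : Int) (eated : List Int) : Int :=
  loopB N eated.sum 1 64

-- ===== PRECONDITION & SPEC =====
-- Pre_ excludes the inputs on which A's feeding loop actually runs with other than six pigs: with fewer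
-- than six A raises IndexError, with a nonpositive total ≤ N A loops forever, and with more than six pigs
-- A updates only the first six entries — a corner outside the problem (which fixes six pigs) whose value
-- no one would specify either way.
def Pre_solve (N : Int) (eated : List Int) : Prop :=
  N < eated.sum ∨ (eated.length = 6 ∧ 0 < eated.sum)
instance (N : Int) (eated : List Int) : Decidable (Pre_solve N eated) := by unfold Pre_solve; infer_instance

def pvWitness_solve : Int × List Int := (10, [1, 1, 1, 1, 1, 1])

def Spec_solve (N : Int) (eated : List Int) (out : Int) : Prop := out = solve_alt N eated
instance (N : Int) (eated : List Int) (out : Int) : Decidable (Spec_solve N eated out) := by unfold Spec_solve; infer_instance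

-- ===== CLAIM (what is proved, stated in full; the proofs are below) =====
def Claim_equal_solve : Prop := ∀ (N : Int) (eated : List Int), Dom_solve N eated → Pre_solve N eated → Spec_solve N eated (solve N eated)

-- ===== LEMMAS AND PROOFS =====

lemma stepA_six (a b c d e f : Int) :
    stepA [a, b, c, d, e, f] = [a+b+f+d, b+c+a+e, c+d+b+f, d+e+c+a, e+f+d+b, f+a+e+c] := by
  simp [stepA, List.range_succ]

lemma stepA_sum (w : List Int) (h : w.length = 6) : (stepA w).sum = w.sum * 4 := by
  rcases w with _ | ⟨a, _ | ⟨b, _ | ⟨c, _ | ⟨d, _ | ⟨e, _ | ⟨f, _ | ⟨g, t⟩⟩⟩⟩⟩⟩⟩ <;>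
    simp [List.length] at h
  rw [stepA_six]; simp; ring

lemma stepA_len (w : List Int) (h : w.length = 6) : (stepA w).length = 6 := by
  rcases w with _ | ⟨a, _ | ⟨b, _ | ⟨c, _ | ⟨d, _ | ⟨e, _ | ⟨f, _ | ⟨g, t⟩⟩⟩⟩⟩⟩⟩ <;>
    simp [List.length] at h
  rw [stepA_six]; rfl

lemma loop_eq : ∀ (fuel : Nat) (N : Int) (w : List Int) (day : Int),
    w.length = 6 → loopA N w day fuel = loopB N w.sum day fuel := by
  intro fuel
  induction fuel with
  | zero => intro N w day _; rfl
  | succ f ih =>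
    intro N w day h
    simp only [loopA, loopB]
    split
    · rw [ih N (stepA w) (day+1) (stepA_len w h), stepA_sum w h]
    · rfl

-- ===== VERDICT (by name: the statement is the Claim_ definition above) =====
theorem solve_spec : Claim_equal_solve := by
  intro N eated _hdom hpre
  unfold Spec_solve solve solve_alt
  by_cases h : eated.length = 6
  · exact loop_eq 64 N eated 1 h
  · have hs : N < eated.sum := by
      rcases hpre with h' | ⟨h6, _⟩
      · exact h'
      · exact absurd h6 h
    rw [show (64 : Nat) = 63 + 1 from rfl]
    simp only [loopA, loopB]
    rw [if_neg (by omega), if_neg (by omega)]
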